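-- pv_equiv track=rewrite | github.com/MrChepe09/Competitive-Programming-Codes | Practice Codes/EID2.py | eidi
-- ===== SOURCE A (Python) =====
-- def eidi(a):
--   rcount = 0
--   for j in range(3):
--     for k in range(j+1, 3):
--       if(a[j]==a[k] and a[j+3]==a[k+3]):
--         rcount+=1
--       elif(a[j]>a[k] and a[j+3]>a[k+3]):
--         rcount+=1
--       elif(a[j]<a[k] and a[j+3]<a[k+3]):
--         rcount+=1
--   if(rcount==3):
--     return "FAIR"
--   return "NOT FAIR"
-- ===== SOURCE B (Python) =====
-- def eidi(a):
--     first = [a[0], a[1], a[2]]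
--     second = [a[3], a[4], a[5]]
--     def rank(t):
--         return [sum(1 for y in t if y < x) for x in t]
--     return "FAIR" if rank(first) == rank(second) else "NOT FAIR"
-- ===== Notes on version B (the rewrite author's own statement) =====
-- stated objective: alternative
-- what changed: B compares per-element rank vectors (for each element, how many elements of its triple are strictly smaller) of the two triples instead of counting pairwise order agreements; equal rank vectors encode exactly the same weak ordering.
import Mathlib
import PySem

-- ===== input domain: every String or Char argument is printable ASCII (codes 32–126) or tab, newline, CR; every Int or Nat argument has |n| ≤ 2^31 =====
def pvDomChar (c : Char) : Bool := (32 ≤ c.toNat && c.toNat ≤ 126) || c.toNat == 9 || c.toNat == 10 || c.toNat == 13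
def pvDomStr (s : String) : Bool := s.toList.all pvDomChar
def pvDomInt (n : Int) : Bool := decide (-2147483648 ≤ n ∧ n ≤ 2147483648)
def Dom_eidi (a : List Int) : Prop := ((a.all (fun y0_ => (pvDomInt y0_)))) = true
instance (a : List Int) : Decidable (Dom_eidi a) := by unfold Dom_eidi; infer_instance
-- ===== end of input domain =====

-- B replaces A's count of concordant pairs by comparing per-element rank vectors of the two triples (alternative decomposition; return value only, no mutation).

-- ===== PORT A =====
def eidi (a : List Int) : String :=
  let rcount : Int := (PySem.List.pyRange 0 3 1).foldl (fun rc j =>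
    (PySem.List.pyRange (j+1) 3 1).foldl (fun rc k =>
      if PySem.List.pyGetD a j 0 = PySem.List.pyGetD a k 0 ∧
         PySem.List.pyGetD a (j+3) 0 = PySem.List.pyGetD a (k+3) 0 then rc + 1
      else if PySem.List.pyGetD a j 0 > PySem.List.pyGetD a k 0 ∧
              PySem.List.pyGetD a (j+3) 0 > PySem.List.pyGetD a (k+3) 0 then rc + 1
      else if PySem.List.pyGetD a j 0 < PySem.List.pyGetD a k 0 ∧
              PySem.List.pyGetD a (j+3) 0 < PySem.List.pyGetD a (k+3) 0 then rc + 1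
      else rc) rc) 0
  if rcount = 3 then "FAIR" else "NOT FAIR"

-- ===== PORT B =====
-- rank(t): for each x in t, how many y in t are strictly smaller (sum of indicators, as in Source B)
def rankv (t : List Int) : List Int :=
  t.map (fun x => t.foldl (fun s y => if y < x then s + 1 else s) (0 : Int))

def eidi_alt (a : List Int) : String :=
  let first := [PySem.List.pyGetD a 0 0, PySem.List.pyGetD a 1 0, PySem.List.pyGetD a 2 0]
  let second := [PySem.List.pyGetD a 3 0, PySem.List.pyGetD a 4 0, PySem.List.pyGetD a 5 0]
  if rankv first = rankv second then "FAIR" else "NOT FAIR"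

-- ===== PRECONDITION & SPEC =====
-- A unconditionally indexes the first six elements, so it raises IndexError on lists shorter than six; those are excluded.
def Pre_eidi (a : List Int) : Prop := 6 ≤ a.length
instance (a : List Int) : Decidable (Pre_eidi a) := by unfold Pre_eidi; infer_instance
def pvWitness_eidi : List Int := [1, 2, 3, 1, 2, 3]

def Spec_eidi (a : List Int) (out : String) : Prop := out = eidi_alt a
instance (a : List Int) (out : String) : Decidable (Spec_eidi a out) := by unfold Spec_eidi; infer_instance

-- ===== CLAIM (what is proved, stated in full; the proofs are below) =====
def Claim_equal_eidi : Prop := ∀ (a : List Int), Dom_eidi a → Pre_eidi a → Spec_eidi a (eidi a)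

-- ===== LEMMAS AND PROOFS =====

-- consistency of the three pairwise comparisons of a real triple, stated finitely
def Trans3 (o1 o2 o3 : Ordering) : Prop :=
  ∃ u v w : Fin 3, compare u v = o1 ∧ compare u w = o2 ∧ compare v w = o3

theorem cmpLt {x y : Int} (h : x < y) : compare x y = Ordering.lt := compare_lt_iff_lt.mpr h
theorem cmpEq {x y : Int} (h : x = y) : compare x y = Ordering.eq := compare_eq_iff_eq.mpr h
theorem cmpGt {x y : Int} (h : y < x) : compare x y = Ordering.gt := compare_gt_iff_gt.mpr h

theorem trans3_int (x y z : Int) : Trans3 (compare x y) (compare x z) (compare y z) := by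
  rcases lt_trichotomy x y with h1 | h1 | h1 <;>
    rcases lt_trichotomy x z with h2 | h2 | h2 <;>
      rcases lt_trichotomy y z with h3 | h3 | h3 <;>
        first
          | omega
          | (simp_all only [cmpLt, cmpEq, cmpGt]; unfold Trans3; decide)

theorem main_cons (x0 x1 x2 x3 x4 x5 : Int) (t : List Int) :
    eidi (x0::x1::x2::x3::x4::x5::t) = eidi_alt (x0::x1::x2::x3::x4::x5::t) := by
  simp only [eidi, eidi_alt, rankv,
    show PySem.List.pyRange 0 3 1 = [0,1,2] from by decide,
    show PySem.List.pyRange (0+1) 3 1 = [1,2] from by decide,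
    show PySem.List.pyRange (1+1) 3 1 = [2] from by decide,
    show PySem.List.pyRange (2+1) 3 1 = [] from by decide,
    show (0:Int)+3 = 3 from by norm_num,
    show (1:Int)+3 = 4 from by norm_num,
    show (2:Int)+3 = 5 from by norm_num,
    List.foldl, List.map]
  simp only [pysem, List.getD_cons_zero, List.getD_cons_succ]
  simp only [gt_iff_lt, lt_self_iff_false, if_false]
  simp only [
    show (x0 < x1) ↔ compare x0 x1 = Ordering.lt from compare_lt_iff_lt.symm,
    show (x1 < x0) ↔ compare x0 x1 = Ordering.gt from compare_gt_iff_gt.symm,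
    show (x0 = x1) ↔ compare x0 x1 = Ordering.eq from compare_eq_iff_eq.symm,
    show (x0 < x2) ↔ compare x0 x2 = Ordering.lt from compare_lt_iff_lt.symm,
    show (x2 < x0) ↔ compare x0 x2 = Ordering.gt from compare_gt_iff_gt.symm,
    show (x0 = x2) ↔ compare x0 x2 = Ordering.eq from compare_eq_iff_eq.symm,
    show (x1 < x2) ↔ compare x1 x2 = Ordering.lt from compare_lt_iff_lt.symm,
    show (x2 < x1) ↔ compare x1 x2 = Ordering.gt from compare_gt_iff_gt.symm,
    show (x1 = x2) ↔ compare x1 x2 = Ordering.eq from compare_eq_iff_eq.symm,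
    show (x3 < x4) ↔ compare x3 x4 = Ordering.lt from compare_lt_iff_lt.symm,
    show (x4 < x3) ↔ compare x3 x4 = Ordering.gt from compare_gt_iff_gt.symm,
    show (x3 = x4) ↔ compare x3 x4 = Ordering.eq from compare_eq_iff_eq.symm,
    show (x3 < x5) ↔ compare x3 x5 = Ordering.lt from compare_lt_iff_lt.symm,
    show (x5 < x3) ↔ compare x3 x5 = Ordering.gt from compare_gt_iff_gt.symm,
    show (x3 = x5) ↔ compare x3 x5 = Ordering.eq from compare_eq_iff_eq.symm,
    show (x4 < x5) ↔ compare x4 x5 = Ordering.lt from compare_lt_iff_lt.symm,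
    show (x5 < x4) ↔ compare x4 x5 = Ordering.gt from compare_gt_iff_gt.symm,
    show (x4 = x5) ↔ compare x4 x5 = Ordering.eq from compare_eq_iff_eq.symm]
  have T1 := trans3_int x0 x1 x2
  have T2 := trans3_int x3 x4 x5
  revert T1 T2
  generalize compare x0 x1 = o1
  generalize compare x0 x2 = o2
  generalize compare x1 x2 = o3
  generalize compare x3 x4 = p1
  generalize compare x3 x5 = p2
  generalize compare x4 x5 = p3
  revert o1 o2 o3 p1 p2 p3
  unfold Trans3
  decide

-- ===== VERDICT (by name: the statement is the Claim_ definition above) =====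
theorem eidi_spec : Claim_equal_eidi := by
  intro a _ hpre
  unfold Spec_eidi
  match a, hpre with
  | x0::x1::x2::x3::x4::x5::t, _ => exact main_cons x0 x1 x2 x3 x4 x5 t
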